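-- pv_equiv track=rewrite | github.com/yuvrajiro/Symbolic-LSTM | utility.py | parse_int
-- ===== SOURCE A (Python) =====
-- def parse_int(lst):
--     """
--     Parse a list that starts with an integer.
--     Return the integer value, and the position it ends in the list.
--     """
--     base = 10
--     balanced = False
--     val = 0
--     if not (balanced and lst[0]=='INT' or base >= 2 and lst[0] in ['INT+', 'INT-'] or base <= -2 and lst[0]=='INT'):
--         raise Exception(f"Invalid integer in prefix expression")
--     i = 0
--     for x in lst[1:]:
--         if not (x.isdigit() or x[0]=='-' and x[1:].isdigit()):
--             break
--         val = val * base + int(x)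
--         i += 1
--     if base > 0 and lst[0]=='INT-':
--         val = -val
--     return val, i + 1
-- ===== SOURCE B (Python) =====
-- def _numlike(x):
--     return x.isdigit() or (x[:1] == '-' and x[1:].isdigit())
--
--
-- def parse_int(lst):
--     """
--     Parse a list that starts with an integer.
--     Return the integer value, and the position it ends in the list.
--     """
--     if lst[0] not in ('INT+', 'INT-'):
--         raise Exception("Invalid integer in prefix expression")
--     rest = lst[1:]
--     k = next((j for j, x in enumerate(rest) if not _numlike(x)), len(rest))
--     digits = rest[:k]
--     val = sum(int(x) * 10 ** (k - 1 - j) for j, x in enumerate(digits))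
--     if lst[0] == 'INT-':
--         val = -val
--     return val, k + 1
-- ===== Notes on version B (the rewrite author's own statement) =====
-- stated objective: alternative
-- what changed: B replaces A's fused break-loop (Horner accumulator val=val*10+int(x) updated in lockstep with the counter) by a decomposition: find the break index in one step, slice out the digit-token prefix, and compute the value as a positional weighted sum int(x)*10^(k-1-j) over the enumerated prefix.
-- crash fix: On lists whose first non-digit-like token after a valid 'INT+'/'INT-' header is the empty string, A raises IndexError (x[0] on ''), while B's x[:1] test returns the integer parsed from the tokens before it. — e.g. on parse_int(["INT+", "5", ""]): A raises IndexError, B returns (5, 2)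
import Mathlib
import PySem

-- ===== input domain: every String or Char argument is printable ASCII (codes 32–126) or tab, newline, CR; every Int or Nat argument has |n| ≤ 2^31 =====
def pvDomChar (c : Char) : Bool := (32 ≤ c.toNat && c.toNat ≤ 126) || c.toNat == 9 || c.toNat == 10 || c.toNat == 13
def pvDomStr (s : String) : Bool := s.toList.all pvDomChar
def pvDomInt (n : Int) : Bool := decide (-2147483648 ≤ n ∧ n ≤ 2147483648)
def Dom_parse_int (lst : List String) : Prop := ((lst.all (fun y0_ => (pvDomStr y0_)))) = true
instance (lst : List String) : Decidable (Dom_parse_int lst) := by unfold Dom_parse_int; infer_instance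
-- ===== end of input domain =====

-- B decomposes A's fused break-loop into break-index + slice + positional weighted sum (alternative, same cost);
-- where A raises IndexError on an empty-string break token, B returns the value parsed so far (see Raises_).

-- ===== PORT A =====
-- x.isdigit() or x[0]=='-' and x[1:].isdigit()   (x[0] on '' raises in Python: excluded by Pre_; here pyGet? gives none)
def pvPredA (x : String) : Bool :=
  PySem.Str.strIsdigit x ||
    ((PySem.Str.pyGet? x 0 == some '-') && PySem.Str.strIsdigit (PySem.Str.slice x (some 1) none))

-- the for-loop with break, carrying (val, i)
def pvGoA : List String → Int → Int → Int × Int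
  | [], val, i => (val, i)
  | x :: xs, val, i =>
    if !pvPredA x then (val, i)
    else pvGoA xs (val * 10 + (PySem.Int.ofStr? x).getD 0) (i + 1)

def parse_int (lst : List String) : Int × Int :=
  let r := pvGoA (PySem.List.slice lst (some 1) none) 0 0
  let val := if PySem.List.pyGet? lst 0 == some "INT-" then -r.1 else r.1
  (val, r.2 + 1)

-- ===== PORT B =====
-- x.isdigit() or (x[:1] == '-' and x[1:].isdigit())   (total: '' → False)
def pvNumlike (x : String) : Bool :=
  PySem.Str.strIsdigit x ||
    (x.toList.take 1 == ['-'] && PySem.Chars.strIsdigit (x.toList.drop 1))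

def parse_int_alt (lst : List String) : Int × Int :=
  let rest := PySem.List.slice lst (some 1) none
  -- k = next((j for j, x in enumerate(rest) if not _numlike(x)), len(rest))
  let k := rest.findIdx (fun x => !pvNumlike x)
  let digits := rest.take k
  -- val = sum(int(x) * 10 ** (k - 1 - j) for j, x in enumerate(digits))
  let val : Int := (digits.zipIdx.map
    (fun p => ((PySem.Int.ofStr? p.1).getD 0) * (10 : Int) ^ (k - 1 - p.2))).sum
  let val := if PySem.List.pyGet? lst 0 == some "INT-" then -val else val
  (val, (k : Int) + 1)

-- ===== PRECONDITION & SPEC =====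
-- Pre_ excludes exactly the inputs where the Python A raises: an empty list / a first token other than
-- 'INT+'/'INT-' (the explicit raise / IndexError on lst[0]), and lists whose first non-digit-like token
-- after the header is '' (IndexError on x[0]).
def Pre_parse_int (lst : List String) : Prop :=
  (lst.head? = some "INT+" ∨ lst.head? = some "INT-") ∧
    (lst.drop 1).find? (fun x => !pvNumlike x) ≠ some ""
instance (lst : List String) : Decidable (Pre_parse_int lst) := by unfold Pre_parse_int; infer_instance
def pvWitness_parse_int : List String := ["INT+", "12", "-3", "x"]

-- On lists with a valid 'INT+'/'INT-' header whose first non-digit-like later token is '', A raises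
-- IndexError (x[0] on '') while B returns the integer parsed from the tokens before it.
def Raises_parse_int (lst : List String) : Prop :=
  (lst.head? = some "INT+" ∨ lst.head? = some "INT-") ∧
    (lst.drop 1).find? (fun x => !pvNumlike x) = some ""
instance (lst : List String) : Decidable (Raises_parse_int lst) := by unfold Raises_parse_int; infer_instance
def pvRaiseWitness_parse_int : List String := ["INT+", "5", ""]
def pvRaiseWitnessOut_parse_int : Int × Int := (5, 2)

def Spec_parse_int (lst : List String) (out : Int × Int) : Prop := out = parse_int_alt lst
instance (lst : List String) (out : Int × Int) : Decidable (Spec_parse_int lst out) := by unfold Spec_parse_int; infer_instance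

-- ===== CLAIM (what is proved, stated in full; the proofs are below) =====
def Claim_equal_parse_int : Prop := ∀ (lst : List String), Dom_parse_int lst → Pre_parse_int lst → Spec_parse_int lst (parse_int lst)
def Claim_raises_parse_int : Prop := (∀ (lst : List String), Dom_parse_int lst → Raises_parse_int lst → ¬ Pre_parse_int lst) ∧ (Dom_parse_int (pvRaiseWitness_parse_int) ∧ Raises_parse_int (pvRaiseWitness_parse_int) ∧ parse_int_alt (pvRaiseWitness_parse_int) = pvRaiseWitnessOut_parse_int)

-- ===== LEMMAS AND PROOFS =====

-- the two loop predicates agree on every string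
theorem pred_eq (x : String) : pvPredA x = pvNumlike x := by
  unfold pvPredA pvNumlike
  cases h : x.toList with
  | nil =>
    simp [PySem.Str.strIsdigit, PySem.Str.pyGet?, PySem.Str.slice, h,
      PySem.Chars.strIsdigit, PySem.Chars.pyGet?, PySem.Chars.slice,
      PySem.List.slice, PySem.List.pyGet?, PySem.List.pyIdx?]
  | cons c cs =>
    simp [PySem.Str.strIsdigit, PySem.Str.pyGet?, PySem.Str.slice, h,
      PySem.Chars.strIsdigit, PySem.Chars.pyGet?,
      PySem.Chars.slice, PySem.List.slice, PySem.List.pyGet?, PySem.List.pyIdx?]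

-- B's value of one token
def pvVal (x : String) : Int := (PySem.Int.ofStr? x).getD 0

-- weighted sum with shifted start index
theorem wsum_shift (t : List String) (m n : Nat) :
    ((t.zipIdx (n + 1)).map (fun p => pvVal p.1 * (10 : Int) ^ (m - p.2))).sum =
      ((t.zipIdx n).map (fun p => pvVal p.1 * (10 : Int) ^ (m - 1 - p.2))).sum := by
  induction t generalizing n with
  | nil => simp
  | cons x xs ih =>
    simp only [List.zipIdx_cons, List.map_cons, List.sum_cons, ih (n + 1)]
    have : m - (n + 1) = m - 1 - n := by omega
    rw [this]

-- Horner fold = positional weighted sum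
theorem go_spec (l : List String) (a i : Int) :
    pvGoA l a i =
      (a * (10 : Int) ^ (l.takeWhile pvNumlike).length +
        ((l.takeWhile pvNumlike).zipIdx.map
          (fun p => pvVal p.1 * (10 : Int) ^ ((l.takeWhile pvNumlike).length - 1 - p.2))).sum,
       i + (l.takeWhile pvNumlike).length) := by
  induction l generalizing a i with
  | nil => simp [pvGoA]
  | cons x xs ih =>
    rw [pvGoA, pred_eq]
    by_cases hx : pvNumlike x
    · simp only [hx, Bool.not_true, Bool.false_eq_true, if_false, ih,
        List.takeWhile_cons_of_pos hx, List.length_cons, List.zipIdx_cons,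
        List.map_cons, List.sum_cons]
      simp only [Prod.mk.injEq]
      constructor
      · simp only [Nat.add_sub_cancel, Nat.sub_zero]
        rw [wsum_shift (xs.takeWhile pvNumlike) ((xs.takeWhile pvNumlike).length) 0]
        simp only [pvVal]
        ring
      · push_cast; ring
    · simp [hx, List.takeWhile_cons_of_neg hx]

theorem findIdx_not_eq_length_takeWhile {α : Type} (p : α → Bool) (l : List α) :
    l.findIdx (fun x => !p x) = (l.takeWhile p).length := by
  induction l with
  | nil => simp
  | cons x xs ih =>
    by_cases hx : p x
    · simp [List.findIdx_cons, hx, List.takeWhile_cons_of_pos hx, ih]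
    · simp [List.findIdx_cons, hx, List.takeWhile_cons_of_neg hx]

theorem ports_agree (lst : List String) : parse_int lst = parse_int_alt lst := by
  unfold parse_int parse_int_alt
  simp only [go_spec, findIdx_not_eq_length_takeWhile, pvVal]
  rw [← List.prefix_iff_eq_take.mp (List.takeWhile_prefix (l := PySem.List.slice lst (some 1) none) pvNumlike)]
  simp

-- ===== VERDICT (by name: the statement is the Claim_ definition above) =====
theorem parse_int_spec : Claim_equal_parse_int := by
  intro lst _ _
  unfold Spec_parse_int
  exact ports_agree lst

@[simp] theorem parse_int_raises : Claim_raises_parse_int := by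
  unfold Claim_raises_parse_int
  constructor
  · intro lst _ hr hp
    exact hp.2 hr.2
  · exact ⟨by decide, by decide, by decide⟩
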